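-- pv_equiv track=rewrite | github.com/GmbxGt/steganography_vigenere | project/steganography.py | hide_text_in_container
-- ===== SOURCE A (Python) =====
-- from dataclasses import dataclass
--
-- ZWS_0 = "\u200B"
--
-- ZWNJ_1 = "\u200C"
--
-- @dataclass(frozen=True)
-- class CapacityInfo:
--     """Информация о ёмкости контейнера.
--
--     Attributes:
--         spaces: Количество пробелов в контейнере.
--         bits_capacity: Сколько бит можно спрятать (в текущей реализации равно
--             ``spaces``).
--     """
--
--     spaces: int
--     bits_capacity: int
--
-- def get_capacity(container: str) -> CapacityInfo:
--     """Посчитать ёмкость текстового контейнера.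
--
--     В текущей реализации 1 пробел == 1 бит.
--
--     Args:
--         container: Текст-контейнер.
--
--     Returns:
--         Объект :class:`CapacityInfo` с количеством пробелов и битовой ёмкостью.
--     """
--     spaces = container.count(" ")
--     return CapacityInfo(spaces, spaces)
--
-- def hide_text_in_container(secret: str, container: str) -> str:
--     """Спрятать битовую строку в контейнере.
--
--     Биты скрываются по порядку: после каждого пробела добавляется один
--     zero-width символ, пока не закончатся биты.
--
--     Args:
--         secret: Битовая строка из ``'0'`` и ``'1'``.
--         container: Текст-контейнер. В нём должно быть достаточно пробелов.
--
--     Returns: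
--         Стего-текст (контейнер с вставленными невидимыми символами).
--
--     Raises:
--         ValueError: Если контейнер не вмещает ``secret``.
--     """
--     cap = get_capacity(container)
--     if len(secret) > cap.bits_capacity:
--         raise ValueError("Контейнер слишком мал")
--
--     out = []
--     i = 0
--     for ch in container:
--         if ch == " " and i < len(secret):
--             out.append(" ")
--             out.append(ZWS_0 if secret[i] == "0" else ZWNJ_1)
--             i += 1
--         else:
--             out.append(ch)
--
--     return "".join(out)
-- ===== SOURCE B (Python) =====
-- ZWS_0 = "\u200B"
-- ZWNJ_1 = "\u200C"
--
-- def hide_text_in_container(secret: str, container: str) -> str: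
--     parts = container.split(" ")
--     if len(secret) > len(parts) - 1:
--         raise ValueError("Контейнер слишком мал")
--     out = [parts[0]]
--     for j, part in enumerate(parts[1:]):
--         if j < len(secret):
--             out.append(" " + (ZWS_0 if secret[j] == "0" else ZWNJ_1))
--         else:
--             out.append(" ")
--         out.append(part)
--     return "".join(out)
-- ===== Notes on version B (the rewrite author's own statement) =====
-- stated objective: alternative
-- what changed: B splits the container on " " once and rebuilds the output segment by segment (joining each space with its zero-width bit), instead of A's character-by-character scan with an in-loop bit counter over every character.
import Mathlib
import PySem

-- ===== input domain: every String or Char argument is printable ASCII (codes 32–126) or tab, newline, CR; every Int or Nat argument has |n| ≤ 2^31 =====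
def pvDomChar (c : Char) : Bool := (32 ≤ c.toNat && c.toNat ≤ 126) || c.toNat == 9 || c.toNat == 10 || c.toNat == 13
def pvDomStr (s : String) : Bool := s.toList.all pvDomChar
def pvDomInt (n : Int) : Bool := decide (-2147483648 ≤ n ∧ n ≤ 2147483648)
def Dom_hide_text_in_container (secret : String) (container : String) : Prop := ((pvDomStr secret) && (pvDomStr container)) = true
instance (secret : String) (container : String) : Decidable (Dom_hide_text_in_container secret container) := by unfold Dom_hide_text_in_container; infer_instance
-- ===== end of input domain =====

-- B rebuilds the output from container.split(" ") segments instead of scanning character by character: alternative decomposition, same cost.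


def pvZWS : Char := '\u200B'
def pvZWNJ : Char := '\u200C'

-- ===== PORT A =====
-- the for-loop over container's characters, with the bit index i and the accumulated output
def hideA_go (secret : List Char) : List Char → Nat → List Char → List Char
  | [], _, out => out
  | ch :: rest, i, out =>
    if ch = ' ' ∧ i < secret.length then
      hideA_go secret rest (i + 1)
        (out ++ [' ', if secret.getD i ' ' = '0' then pvZWS else pvZWNJ])
    else
      hideA_go secret rest i (out ++ [ch])

def hide_text_in_container (secret : String) (container : String) : String :=
  let cap := PySem.Str.count container " "          -- get_capacity: container.count(" ")
  if secret.toList.length > cap then ""             -- Python raises ValueError here (outside Pre_)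
  else String.ofList (hideA_go secret.toList container.toList 0 [])

-- ===== PORT B =====
-- the for-loop over parts[1:] with the space index j, building the joined output front to back
def hideB_go (secret : List Char) : List (List Char) → Nat → List Char
  | [], _ => []
  | p :: ps, j =>
    ((' ' :: (if j < secret.length then
        [if secret.getD j ' ' = '0' then pvZWS else pvZWNJ] else [])) ++ p)
      ++ hideB_go secret ps (j + 1)

def hide_text_in_container_alt (secret : String) (container : String) : String :=
  let parts := PySem.Chars.splitOn container.toList [' ']   -- container.split(" ")
  if secret.toList.length > parts.length - 1 then ""        -- Python raises ValueError here (outside Pre_)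
  else
    match parts with
    | [] => ""                                              -- unreachable: split never returns []
    | p0 :: rest => String.ofList (p0 ++ hideB_go secret.toList rest 0)

-- ===== PRECONDITION & SPEC =====
-- Pre_ excludes exactly the inputs where the secret has more bits than the container has spaces: both A and B raise ValueError there.
def Pre_hide_text_in_container (secret : String) (container : String) : Prop :=
  secret.toList.length ≤ container.toList.count ' '
instance (secret : String) (container : String) : Decidable (Pre_hide_text_in_container secret container) := by unfold Pre_hide_text_in_container; infer_instance

def pvWitness_hide_text_in_container : String × String := ("01", "a b c")

def Spec_hide_text_in_container (secret : String) (container : String) (out : String) : Prop := out = hide_text_in_container_alt secret container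
instance (secret : String) (container : String) (out : String) : Decidable (Spec_hide_text_in_container secret container out) := by unfold Spec_hide_text_in_container; infer_instance

-- ===== CLAIM (what is proved, stated in full; the proofs are below) =====
def Claim_equal_hide_text_in_container : Prop := ∀ (secret : String) (container : String), Dom_hide_text_in_container secret container → Pre_hide_text_in_container secret container → Spec_hide_text_in_container secret container (hide_text_in_container secret container)

-- ===== LEMMAS AND PROOFS =====

-- split(" ") as a structural recursion (proof-side characterisation of PySem.Chars.splitOn · [' '])
def spSplit : List Char → List (List Char)
  | [] => [[]]
  | c :: cs =>
    if c = ' ' then [] :: spSplit cs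
    else
      match spSplit cs with
      | p :: ps => (c :: p) :: ps
      | [] => [[c]]

theorem spSplit_ne_nil (cs : List Char) : spSplit cs ≠ [] := by
  induction cs with
  | nil => simp [spSplit]
  | cons c cs ih =>
    simp only [spSplit]
    split
    · simp
    · cases h : spSplit cs with
      | nil => exact absurd h ih
      | cons p ps => simp

theorem splitOn_go_space (cs : List Char) : ∀ (fuel : Nat) (cur : List Char) (acc : List (List Char)),
    cs.length < fuel →
    PySem.Chars.splitOn.go [' '] fuel cs cur acc =
      acc.reverse ++ (match spSplit cs with
        | p :: ps => (cur.reverse ++ p) :: ps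
        | [] => [cur.reverse]) := by
  induction cs with
  | nil =>
    intro fuel cur acc h
    match fuel, h with
    | fuel + 1, _ => simp [PySem.Chars.splitOn.go, spSplit]
  | cons c cs ih =>
    intro fuel cur acc h
    match fuel, h with
    | fuel + 1, h =>
      by_cases hc : c = ' '
      · subst hc
        have : List.isPrefixOf [' '] (' ' :: cs) = true := by simp [List.isPrefixOf]
        simp only [PySem.Chars.splitOn.go, this, if_pos, List.length_cons, List.length_nil,
          List.drop_succ_cons, List.drop_zero]
        rw [ih fuel [] (cur.reverse :: acc) (by simpa using Nat.lt_of_succ_lt_succ h)]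
        simp only [spSplit]
        cases hs : spSplit cs with
        | nil => exact absurd hs (spSplit_ne_nil cs)
        | cons p ps => simp
      · have : List.isPrefixOf [' '] (c :: cs) = false := by
          simp [List.isPrefixOf]; exact fun h => hc h.symm
        simp only [PySem.Chars.splitOn.go, this]
        rw [ih fuel (c :: cur) acc (by simpa using Nat.lt_of_succ_lt_succ h)]
        simp only [spSplit, if_neg hc]
        cases hs : spSplit cs with
        | nil => exact absurd hs (spSplit_ne_nil cs)
        | cons p ps => simp

theorem splitOn_eq_spSplit (cs : List Char) :
    PySem.Chars.splitOn cs [' '] = spSplit cs := by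
  unfold PySem.Chars.splitOn
  rw [splitOn_go_space cs (cs.length + 1) [] [] (Nat.lt_succ_self _)]
  cases hs : spSplit cs with
  | nil => exact absurd hs (spSplit_ne_nil cs)
  | cons p ps => simp

theorem count_go_space (cs : List Char) : ∀ (fuel : Nat) (acc : Nat),
    cs.length ≤ fuel →
    PySem.Chars.count.go [' '] fuel cs acc = acc + cs.count ' ' := by
  induction cs with
  | nil =>
    intro fuel acc _
    cases fuel <;> simp [PySem.Chars.count.go]
  | cons c cs ih =>
    intro fuel acc h
    match fuel, h with
    | fuel + 1, h =>
      by_cases hc : c = ' '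
      · subst hc
        have : List.isPrefixOf [' '] (' ' :: cs) = true := by simp [List.isPrefixOf]
        simp only [PySem.Chars.count.go, this, if_pos, List.length_cons, List.length_nil,
          List.drop_succ_cons, List.drop_zero]
        rw [ih fuel (acc + 1) (by simpa using Nat.le_of_succ_le_succ h)]
        simp
        omega
      · have : List.isPrefixOf [' '] (c :: cs) = false := by
          simp [List.isPrefixOf]; exact fun h => hc h.symm
        simp only [PySem.Chars.count.go, this]
        rw [ih fuel acc (by simpa using Nat.le_of_succ_le_succ h)]
        simp [hc]
    | 0, h => exact absurd h (by simp)

theorem count_space (cs : List Char) : PySem.Chars.count cs [' '] = cs.count ' ' := by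
  unfold PySem.Chars.count
  simp only [List.isEmpty_cons, if_false, Bool.false_eq_true]
  simpa using count_go_space cs cs.length 0 (Nat.le_refl _)

theorem spSplit_length (cs : List Char) : (spSplit cs).length = cs.count ' ' + 1 := by
  induction cs with
  | nil => simp [spSplit]
  | cons c cs ih =>
    simp only [spSplit]
    by_cases hc : c = ' '
    · simp [hc, ih]
    · simp only [if_neg hc]
      cases hs : spSplit cs with
      | nil => exact absurd hs (spSplit_ne_nil cs)
      | cons p ps =>
        simp [hc]
        have := ih
        rw [hs] at this
        simpa using this

-- A's loop with the accumulator pulled out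
theorem hideA_go_append (secret : List Char) (cs : List Char) :
    ∀ (i : Nat) (out : List Char),
      hideA_go secret cs i out = out ++ hideA_go secret cs i [] := by
  induction cs with
  | nil => intro i out; simp [hideA_go]
  | cons c cs ih =>
    intro i out
    simp only [hideA_go]
    split
    · rw [ih (i + 1) (out ++ _), ih (i + 1) ([] ++ _)]
      simp
    · rw [ih i (out ++ [c]), ih i ([] ++ [c])]
      simp

-- B's loop does not depend on the exact value of an exhausted bit index
theorem hideB_go_saturate (secret : List Char) (ps : List (List Char)) :
    ∀ (j j' : Nat), secret.length ≤ j → secret.length ≤ j' →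
      hideB_go secret ps j = hideB_go secret ps j' := by
  induction ps with
  | nil => intro j j' _ _; simp [hideB_go]
  | cons p ps ih =>
    intro j j' hj hj'
    simp only [hideB_go, if_neg (by omega : ¬ j < secret.length),
      if_neg (by omega : ¬ j' < secret.length)]
    rw [ih (j + 1) (j' + 1) (by omega) (by omega)]

-- the core correspondence: A's character scan equals B's segment rebuild
theorem hideA_eq_spSplit (secret : List Char) (cs : List Char) :
    ∀ (i : Nat),
      hideA_go secret cs i [] =
        (match spSplit cs with
         | p :: ps => p ++ hideB_go secret ps i
         | [] => []) := by
  induction cs with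
  | nil => intro i; simp [hideA_go, spSplit, hideB_go]
  | cons c cs ih =>
    intro i
    by_cases hc : c = ' '
    · subst hc
      cases hs : spSplit cs with
      | nil => exact absurd hs (spSplit_ne_nil cs)
      | cons p ps =>
        by_cases hi : i < secret.length
        · rw [show hideA_go secret (' ' :: cs) i [] =
              hideA_go secret cs (i + 1)
                ([] ++ [' ', if secret.getD i ' ' = '0' then pvZWS else pvZWNJ]) from by
            simp [hideA_go, hi]]
          rw [hideA_go_append, ih (i + 1), hs]
          rw [show spSplit (' ' :: cs) = [] :: spSplit cs from by simp [spSplit], hs]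
          simp [hideB_go, hi]
        · rw [show hideA_go secret (' ' :: cs) i [] =
              hideA_go secret cs i ([] ++ [' ']) from by
            simp [hideA_go, hi]]
          rw [hideA_go_append, ih i, hs]
          rw [show spSplit (' ' :: cs) = [] :: spSplit cs from by simp [spSplit], hs]
          simp [hideB_go, hi]
          exact hideB_go_saturate secret ps i (i + 1) (by omega) (by omega)
    · cases hs : spSplit cs with
      | nil => exact absurd hs (spSplit_ne_nil cs)
      | cons p ps =>
        rw [show hideA_go secret (c :: cs) i [] =
            hideA_go secret cs i ([] ++ [c]) from by
          simp only [hideA_go]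
          rw [if_neg (show ¬ (c = ' ' ∧ i < secret.length) from fun h => hc h.1)]]
        rw [hideA_go_append, ih i, hs]
        simp only [spSplit, if_neg hc, hs]
        simp

-- ===== VERDICT (by name: the statement is the Claim_ definition above) =====
theorem hide_text_in_container_spec : Claim_equal_hide_text_in_container := by
  intro secret container _ hpre
  unfold Spec_hide_text_in_container
  unfold hide_text_in_container hide_text_in_container_alt
  unfold Pre_hide_text_in_container at hpre
  have hcap : PySem.Str.count container " " = container.toList.count ' ' := by
    unfold PySem.Str.count
    have : (" " : String).toList = [' '] := rfl
    rw [this, count_space]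
  have hsplit : PySem.Chars.splitOn container.toList [' '] = spSplit container.toList :=
    splitOn_eq_spSplit container.toList
  have hlen : (spSplit container.toList).length = container.toList.count ' ' + 1 :=
    spSplit_length container.toList
  simp only [hcap, hsplit, hlen]
  rw [if_neg (by omega), if_neg (by omega)]
  cases hs : spSplit container.toList with
  | nil => exact absurd hs (spSplit_ne_nil container.toList)
  | cons p ps =>
    have := hideA_eq_spSplit secret.toList container.toList 0
    rw [hs] at this
    rw [this]
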